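-- pv_equiv track=rewrite | github.com/amryyahya/web-app-2fa | app/src/main/python/TOTP.py | splitTo4BitsChunks
-- ===== SOURCE A (Python) =====
-- S=4
--
-- def splitTo4BitsChunks(number):
--     chunks = []
--     while number > 0:
--         chunk = number & 0xF
--         chunks.append(chunk)
--         number >>= S
--     chunks.reverse()
--     return chunks
-- ===== SOURCE B (Python) =====
-- def splitTo4BitsChunks(number):
--     if number <= 0:
--         return []
--     return [int(c, 16) for c in '%x' % number]
-- ===== Notes on version B (the rewrite author's own statement) =====
-- stated objective: idiomatic
-- what changed: Replaces the mask-and-shift accumulation loop plus final list reversal with hex-string formatting ('%x') and a left-to-right digit decode, so nibbles come out most-significant-first with no reversal.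
import Mathlib
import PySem

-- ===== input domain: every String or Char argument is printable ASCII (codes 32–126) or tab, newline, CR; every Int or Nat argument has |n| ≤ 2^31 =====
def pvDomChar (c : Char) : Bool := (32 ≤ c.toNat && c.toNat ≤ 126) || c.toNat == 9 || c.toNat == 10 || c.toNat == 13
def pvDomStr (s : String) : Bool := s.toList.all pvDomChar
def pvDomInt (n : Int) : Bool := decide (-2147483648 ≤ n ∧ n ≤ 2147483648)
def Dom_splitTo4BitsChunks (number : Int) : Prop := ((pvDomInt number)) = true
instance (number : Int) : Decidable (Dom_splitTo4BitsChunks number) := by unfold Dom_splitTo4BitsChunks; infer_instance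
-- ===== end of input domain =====

-- B replaces A's mask-and-shift loop plus final reverse by hex-string formatting and
-- a left-to-right digit decode (idiomatic, no reversal); return values are identical.

-- ===== PORT A =====
-- while number > 0: chunks.append(number & 0xF); number >>= 4   — then chunks.reverse()
def splitTo4BitsChunksLoop (number : Int) (chunks : List Int) : List Int :=
  if h : 0 < number then
    splitTo4BitsChunksLoop (number >>> (4:Nat)) (chunks ++ [PySem.Int.band number 0xF])
  else chunks
termination_by number.toNat
decreasing_by
  have h16 : number >>> (4:Nat) = number / 16 := by
    rw [Int.shiftRight_eq_div_pow]; norm_num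
  omega

def splitTo4BitsChunks (number : Int) : List Int :=
  (splitTo4BitsChunksLoop number []).reverse

-- ===== PORT B =====
-- '%x' % n for n > 0, ported by hand (exact there): most-significant hex digit first, lowercase
def hexDigitChar (d : Nat) : Char :=
  if d < 10 then Char.ofNat (48 + d) else Char.ofNat (87 + d)

def hexChars (n : Nat) : List Char :=
  if n < 16 then [hexDigitChar n]
  else hexChars (n / 16) ++ [hexDigitChar (n % 16)]
termination_by n
decreasing_by omega

-- int(c, 16) for a lowercase hex digit character, ported by hand (exact there)
def hexVal (c : Char) : Int :=
  if 97 ≤ c.toNat then (c.toNat : Int) - 87 else (c.toNat : Int) - 48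

def splitTo4BitsChunks_alt (number : Int) : List Int :=
  if number ≤ 0 then [] else (hexChars number.toNat).map hexVal

-- ===== PRECONDITION & SPEC =====
def Spec_splitTo4BitsChunks (number : Int) (out : List Int) : Prop := out = splitTo4BitsChunks_alt number
instance (number : Int) (out : List Int) : Decidable (Spec_splitTo4BitsChunks number out) := by unfold Spec_splitTo4BitsChunks; infer_instance

-- ===== CLAIM (what is proved, stated in full; the proofs are below) =====
def Claim_equal_splitTo4BitsChunks : Prop := ∀ (number : Int), Dom_splitTo4BitsChunks number → Spec_splitTo4BitsChunks number (splitTo4BitsChunks number)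

-- ===== LEMMAS AND PROOFS =====

theorem shift4_eq_div (n : Int) : n >>> (4:Nat) = n / 16 := by
  rw [Int.shiftRight_eq_div_pow]; norm_num

theorem shift4_toNat (n : Int) : (n >>> (4:Nat)).toNat = n.toNat / 16 := by
  have := shift4_eq_div n; omega

theorem loop_pos (n : Int) (c : List Int) (h : 0 < n) :
    splitTo4BitsChunksLoop n c = splitTo4BitsChunksLoop (n >>> (4:Nat)) (c ++ [PySem.Int.band n 0xF]) := by
  conv_lhs => rw [splitTo4BitsChunksLoop]
  rw [dif_pos h]

theorem loop_neg (n : Int) (c : List Int) (h : ¬ 0 < n) :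
    splitTo4BitsChunksLoop n c = c := by
  rw [splitTo4BitsChunksLoop, dif_neg h]

theorem loop_acc_aux (k : Nat) : ∀ (n : Int), n.toNat = k → ∀ (c : List Int),
    splitTo4BitsChunksLoop n c = c ++ splitTo4BitsChunksLoop n [] := by
  induction k using Nat.strong_induction_on with
  | _ k ih =>
    intro n hk c
    by_cases h : 0 < n
    · have hlt : (n >>> (4:Nat)).toNat < k := by have := shift4_toNat n; omega
      rw [loop_pos n c h, loop_pos n [] h,
          ih _ hlt (n >>> (4:Nat)) rfl (c ++ [PySem.Int.band n 0xF]),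
          ih _ hlt (n >>> (4:Nat)) rfl ([] ++ [PySem.Int.band n 0xF])]
      simp
    · rw [loop_neg n c h, loop_neg n [] h]; simp

theorem loop_acc (n : Int) (c : List Int) :
    splitTo4BitsChunksLoop n c = c ++ splitTo4BitsChunksLoop n [] :=
  loop_acc_aux n.toNat n rfl c

theorem hexVal_hexDigitChar (d : Nat) (hd : d < 16) : hexVal (hexDigitChar d) = (d : Int) := by
  interval_cases d <;> decide

theorem band15 (n : Int) (h : 0 < n) : PySem.Int.band n 0xF = ((n.toNat % 16 : Nat) : Int) := by
  rw [PySem.Int.band_of_nonneg (by omega) (by norm_num)]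
  have h2 := Nat.and_two_pow_sub_one_eq_mod n.toNat 4
  norm_num at h2
  simp only [show ((0xF : Int)).toNat = 15 from rfl, h2]

theorem loop_eq_hex (n : Int) (h : 0 < n) :
    (splitTo4BitsChunksLoop n []).reverse = (hexChars n.toNat).map hexVal := by
  rw [loop_pos n [] h, loop_acc, hexChars]
  by_cases h16 : n.toNat < 16
  · have hz : ¬ (0 < n >>> (4:Nat)) := by have := shift4_toNat n; omega
    rw [loop_neg _ _ hz, if_pos h16]
    simp [band15 n h, hexVal_hexDigitChar n.toNat (by omega), Nat.mod_eq_of_lt h16]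
  · have hpos : 0 < n >>> (4:Nat) := by have := shift4_toNat n; have := shift4_eq_div n; omega
    rw [if_neg h16]
    have ih := loop_eq_hex (n >>> (4:Nat)) hpos
    rw [shift4_toNat n] at ih
    simp [← ih, band15 n h, hexVal_hexDigitChar (n.toNat % 16) (Nat.mod_lt _ (by norm_num))]
termination_by n.toNat
decreasing_by
  have := shift4_toNat n; have := shift4_eq_div n; omega

-- ===== VERDICT (by name: the statement is the Claim_ definition above) =====
theorem splitTo4BitsChunks_spec : Claim_equal_splitTo4BitsChunks := by
  intro n _
  unfold Spec_splitTo4BitsChunks splitTo4BitsChunks splitTo4BitsChunks_alt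
  by_cases h : n ≤ 0
  · rw [if_pos h, loop_neg n [] (by omega)]; rfl
  · rw [if_neg h, loop_eq_hex n (by omega)]
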